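-- pv_equiv track=rewrite | github.com/Vizards8/CSCI_6511_AI | AI_vs_AI.py | count_consecutives
-- ===== SOURCE A (Python) =====
-- def count_consecutives(window, player):
--     consecutive_count = 0
--     max_consecutive_count = 0
--
--     for i in window:
--         if i == player:
--             consecutive_count += 1
--             max_consecutive_count = max(max_consecutive_count, consecutive_count)
--         else:
--             consecutive_count = 0
--
--     return max_consecutive_count
-- ===== SOURCE B (Python) =====
-- def count_consecutives(window, player):
--     # build maximal runs of equal consecutive elements, then reduce
--     runs = []  # list of [value, length]
--     for x in window:
--         if runs and runs[-1][0] == x: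
--             runs[-1][1] += 1
--         else:
--             runs.append([x, 1])
--     return max((n for v, n in runs if v == player), default=0)
-- ===== Notes on version B (the rewrite author's own statement) =====
-- stated objective: alternative
-- what changed: Replaces the running-counter/branch loop by a build-runs-then-reduce structure: group the window into maximal runs of equal consecutive elements, then take the maximum length among runs equal to player (default 0).
import Mathlib
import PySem

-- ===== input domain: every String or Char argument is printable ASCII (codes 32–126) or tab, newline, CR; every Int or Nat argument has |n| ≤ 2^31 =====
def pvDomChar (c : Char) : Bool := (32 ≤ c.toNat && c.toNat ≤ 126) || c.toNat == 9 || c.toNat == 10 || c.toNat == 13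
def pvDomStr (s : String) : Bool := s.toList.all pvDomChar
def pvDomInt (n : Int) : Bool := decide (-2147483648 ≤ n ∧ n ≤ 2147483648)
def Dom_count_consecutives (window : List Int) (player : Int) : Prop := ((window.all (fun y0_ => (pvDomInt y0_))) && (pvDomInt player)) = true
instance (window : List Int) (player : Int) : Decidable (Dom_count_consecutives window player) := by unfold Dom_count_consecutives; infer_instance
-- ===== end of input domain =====

-- B replaces A's running-counter loop by a build-runs-then-reduce structure (same cost, different decomposition).


-- ===== PORT A =====
def count_consecutives (window : List Int) (player : Int) : Int :=
  (window.foldl (fun (st : Int × Int) i =>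
    if i == player then (st.1 + 1, max st.2 (st.1 + 1)) else (0, st.2)) (0, 0)).2

-- ===== PORT B =====
-- one step of the run-building loop; runs are accumulated with the current run at the head
def ccRunsStep (rruns : List (Int × Int)) (x : Int) : List (Int × Int) :=
  match rruns with
  | (v, n) :: rest => if v == x then (v, n + 1) :: rest else (x, 1) :: (v, n) :: rest
  | [] => [(x, 1)]

def count_consecutives_alt (window : List Int) (player : Int) : Int :=
  let runs := (window.foldl ccRunsStep []).reverse
  (((runs.filter (fun p => p.1 == player)).map Prod.snd).foldl max 0)

-- ===== PRECONDITION & SPEC =====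
def Spec_count_consecutives (window : List Int) (player : Int) (out : Int) : Prop := out = count_consecutives_alt window player
instance (window : List Int) (player : Int) (out : Int) : Decidable (Spec_count_consecutives window player out) := by unfold Spec_count_consecutives; infer_instance

-- ===== CLAIM (what is proved, stated in full; the proofs are below) =====
def Claim_equal_count_consecutives : Prop := ∀ (window : List Int) (player : Int), Dom_count_consecutives window player → Spec_count_consecutives window player (count_consecutives window player)

-- ===== LEMMAS AND PROOFS =====

-- maximum run length for `player` among a run list
def ccM (player : Int) (r : List (Int × Int)) : Int :=
  ((r.filter (fun p => p.1 == player)).map Prod.snd).foldl max 0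

-- length of the current (head) run if it matches `player`, else 0
def ccHd (player : Int) (r : List (Int × Int)) : Int :=
  match r with
  | (v, n) :: _ => if v = player then n else 0
  | [] => 0

theorem foldl_max_max (a b : Int) (l : List Int) :
    l.foldl max (max a b) = max a (l.foldl max b) := by
  induction l generalizing b with
  | nil => rfl
  | cons x xs ih =>
    simp only [List.foldl_cons]
    rw [max_assoc, ih]

theorem foldl_max_reverse (a : Int) (l : List Int) :
    l.reverse.foldl max a = l.foldl max a := by
  induction l generalizing a with
  | nil => rfl
  | cons x xs ih =>
    rw [List.reverse_cons, List.foldl_append, ih]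
    simp only [List.foldl_cons, List.foldl_nil]
    rw [max_comm a x, foldl_max_max]
    exact max_comm _ _

theorem ccM_cons (player v n : Int) (rest : List (Int × Int)) :
    ccM player ((v, n) :: rest) = if v = player then max n (ccM player rest) else ccM player rest := by
  by_cases h : v = player
  · simp [ccM, h, show max (0 : Int) n = max n 0 from max_comm 0 n, foldl_max_max]
  · simp [ccM, h]

theorem ccM_reverse (player : Int) (r : List (Int × Int)) :
    ccM player r.reverse = ccM player r := by
  unfold ccM
  rw [List.filter_reverse, List.map_reverse, foldl_max_reverse]

-- the loop invariant: A's fold state is (head-run length, max so far) of B's run list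
theorem cc_invariant (player : Int) (l : List Int) (r : List (Int × Int)) :
    (l.foldl (fun (st : Int × Int) i =>
      if i == player then (st.1 + 1, max st.2 (st.1 + 1)) else (0, st.2)) (ccHd player r, ccM player r)).2
      = ccM player (l.foldl ccRunsStep r) := by
  induction l generalizing r with
  | nil => rfl
  | cons x xs ih =>
    have hstep : (if x == player then (ccHd player r + 1, max (ccM player r) (ccHd player r + 1))
        else ((0 : Int), ccM player r)) = (ccHd player (ccRunsStep r x), ccM player (ccRunsStep r x)) := by
      match r with
      | [] =>
        by_cases hx : x = player <;> simp [ccRunsStep, ccHd, ccM, hx]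
      | (v, n) :: rest =>
        by_cases hv : v = x
        · by_cases hx : x = player
          · simp [ccRunsStep, ccHd, ccM_cons, hv, hx]
            exact max_comm _ _
          · simp [ccRunsStep, ccHd, hv, hx, ccM_cons]
        · by_cases hx : x = player
          · have hv' : ¬ v = player := fun h => hv (h.trans hx.symm)
            simp [ccRunsStep, ccHd, hx, hv', ccM_cons]
            exact max_comm _ _
          · simp [ccRunsStep, ccHd, hv, hx, ccM_cons]
    simp only [List.foldl_cons, hstep, ih]

-- ===== VERDICT (by name: the statement is the Claim_ definition above) =====
theorem count_consecutives_spec : Claim_equal_count_consecutives := by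
  intro window player _
  show _ = _
  unfold count_consecutives count_consecutives_alt
  have := cc_invariant player window []
  simp only [ccHd, ccM, List.filter_nil, List.map_nil, List.foldl_nil] at this
  rw [this]
  exact (ccM_reverse player _).symm
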